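-- pv_equiv track=rewrite | github.com/epoch8260/Torch_RS_Seg | tools/utils.py | find_best_value_index
-- ===== SOURCE A (Python) =====
-- def find_best_value_index(value_list: list, higher_better=True):
--     def _sub_func(value: list):
--         temp_list = []
--         for i, v in enumerate(value_list):
--             if v == value:
--                 temp_list.append(i)
--         return temp_list[-1]
--
--     if higher_better:
--         max_val = max(value_list)
--         return _sub_func(value=max_val)
--     else:
--         min_val = min(value_list)
--         return _sub_func(value=min_val)
-- ===== SOURCE B (Python) =====
-- def find_best_value_index(value_list: list, higher_better=True):
--     best_val = None
--     best_idx = None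
--     for i, v in enumerate(value_list):
--         if best_idx is None or (v >= best_val if higher_better else v <= best_val):
--             best_val = v
--             best_idx = i
--     if best_idx is None:
--         raise ValueError("find_best_value_index() arg is an empty sequence")
--     return best_idx
-- ===== Notes on version B (the rewrite author's own statement) =====
-- stated objective: alternative
-- what changed: B does one pass maintaining the running best value and its latest index (ties update, so the last extremal index wins), instead of calling max()/min() and then rescanning the whole list for equal elements.
import Mathlib
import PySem

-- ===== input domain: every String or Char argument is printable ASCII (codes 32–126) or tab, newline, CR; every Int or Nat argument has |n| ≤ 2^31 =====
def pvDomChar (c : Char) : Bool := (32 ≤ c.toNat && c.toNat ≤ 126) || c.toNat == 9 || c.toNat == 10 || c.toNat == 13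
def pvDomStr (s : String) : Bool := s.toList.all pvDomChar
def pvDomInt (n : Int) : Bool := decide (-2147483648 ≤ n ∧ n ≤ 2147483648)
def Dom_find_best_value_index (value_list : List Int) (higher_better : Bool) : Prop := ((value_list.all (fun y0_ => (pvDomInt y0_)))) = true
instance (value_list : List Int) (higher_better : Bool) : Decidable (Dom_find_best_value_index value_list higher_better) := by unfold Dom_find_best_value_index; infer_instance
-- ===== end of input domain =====

-- B replaces A's max()/min() pass plus a full rescan for equal elements by ONE pass that keeps
-- the running best value and its latest index (ties update, so the last extremal index wins).
-- Both programs raise ValueError on an empty list; that input is excluded by Pre_.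

-- ===== PORT A =====
-- _sub_func: collect all indices i with value_list[i] == value, return temp_list[-1]
def pvSubFunc (value_list : List Int) (value : Int) : List Int :=
  (PySem.List.enumerate value_list 0).foldl
    (fun temp_list p => if p.2 == value then temp_list ++ [p.1] else temp_list) []

def find_best_value_index (value_list : List Int) (higher_better : Bool) : Int :=
  if higher_better then
    match PySem.List.max? value_list (fun y => y) with
    | some max_val => (PySem.List.pyGet? (pvSubFunc value_list max_val) (-1)).getD 0
      -- pyGet? none = IndexError (unreachable: max_val occurs in the list)
    | none => 0  -- max() raises ValueError on an empty list; excluded by Pre_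
  else
    match PySem.List.min? value_list (fun y => y) with
    | some min_val => (PySem.List.pyGet? (pvSubFunc value_list min_val) (-1)).getD 0
    | none => 0  -- min() raises ValueError on an empty list; excluded by Pre_

-- ===== PORT B =====
-- single-pass state: some (best_val, best_idx), none before the first element
def pvStep (higher_better : Bool) (st : Option (Int × Int)) (p : Int × Int) : Option (Int × Int) :=
  match st with
  | none => some (p.2, p.1)
  | some (bv, bi) =>
      if (if higher_better then bv ≤ p.2 else p.2 ≤ bv) then some (p.2, p.1) else some (bv, bi)

def find_best_value_index_alt (value_list : List Int) (higher_better : Bool) : Int :=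
  match (PySem.List.enumerate value_list 0).foldl (pvStep higher_better) none with
  | some (_, best_idx) => best_idx
  | none => 0  -- raise ValueError on an empty list; excluded by Pre_

-- ===== PRECONDITION & SPEC =====
-- both A (via max()/min()) and B raise ValueError on an empty list
def Pre_find_best_value_index (value_list : List Int) (higher_better : Bool) : Prop :=
  value_list ≠ []
instance (value_list : List Int) (higher_better : Bool) : Decidable (Pre_find_best_value_index value_list higher_better) := by unfold Pre_find_best_value_index; infer_instance

def pvWitness_find_best_value_index : List Int × Bool := ([3, 7, 7, 2], true)

def Spec_find_best_value_index (value_list : List Int) (higher_better : Bool) (out : Int) : Prop := out = find_best_value_index_alt value_list higher_better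
instance (value_list : List Int) (higher_better : Bool) (out : Int) : Decidable (Spec_find_best_value_index value_list higher_better out) := by unfold Spec_find_best_value_index; infer_instance

-- ===== CLAIM (what is proved, stated in full; the proofs are below) =====
def Claim_equal_find_best_value_index : Prop := ∀ (value_list : List Int) (higher_better : Bool), Dom_find_best_value_index value_list higher_better → Pre_find_best_value_index value_list higher_better → Spec_find_best_value_index value_list higher_better (find_best_value_index value_list higher_better)

-- ===== LEMMAS AND PROOFS =====

lemma max?_id_concat (xs : List Int) (x m : Int)
    (h : PySem.List.max? xs (fun y => y) = some m) :
    PySem.List.max? (xs ++ [x]) (fun y => y) = some (max m x) := by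
  cases xs with
  | nil => simp [PySem.List.max?] at h
  | cons y t =>
      rw [PySem.List.max?_id_cons] at h
      rw [List.cons_append, PySem.List.max?_id_cons, List.foldl_append]
      simp at h
      simp [h]

lemma min?_id_concat (xs : List Int) (x m : Int)
    (h : PySem.List.min? xs (fun y => y) = some m) :
    PySem.List.min? (xs ++ [x]) (fun y => y) = some (min m x) := by
  cases xs with
  | nil => simp [PySem.List.min?] at h
  | cons y t =>
      rw [PySem.List.min?_id_cons] at h
      rw [List.cons_append, PySem.List.min?_id_cons, List.foldl_append]
      simp at h
      simp [h]

lemma pvSubFunc_concat (xs : List Int) (x v : Int) :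
    pvSubFunc (xs ++ [x]) v
      = if x == v then pvSubFunc xs v ++ [(xs.length : Int)] else pvSubFunc xs v := by
  unfold pvSubFunc
  rw [PySem.List.enumerate_append, List.foldl_append]
  simp [PySem.List.enumerate]

-- the joint invariant: A's extremal value, B's fold state, and A's last matching index agree
lemma pv_key (hb : Bool) (l : List Int) (hne : l ≠ []) :
    ∃ m i,
      (if hb then PySem.List.max? l (fun y => y) else PySem.List.min? l (fun y => y)) = some m ∧
      (PySem.List.enumerate l 0).foldl (pvStep hb) none = some (m, i) ∧
      (pvSubFunc l m).getLast? = some i := by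
  induction l using List.reverseRecOn with
  | nil => exact absurd rfl hne
  | append_singleton xs x ih =>
      by_cases hxs : xs = []
      · subst hxs
        refine ⟨x, 0, ?_, ?_, ?_⟩
        · cases hb <;> simp [PySem.List.max?, PySem.List.min?]
        · simp [PySem.List.enumerate, pvStep]
        · simp [pvSubFunc, PySem.List.enumerate]
      · obtain ⟨m, i, hext, hfold, hlast⟩ := ih hxs
        rw [PySem.List.enumerate_append, List.foldl_append, hfold]
        by_cases hupd : (if hb then m ≤ x else x ≤ m)
        · -- x is at least as good: B updates; the extremal value becomes x (= max/min m x)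
          refine ⟨x, (xs.length : Int), ?_, ?_, ?_⟩
          · cases hb with
            | true =>
                simp only [if_true] at hext hupd ⊢
                rw [max?_id_concat xs x m hext, max_eq_right hupd]
            | false =>
                simp only [Bool.false_eq_true, if_false] at hext hupd ⊢
                rw [min?_id_concat xs x m hext, min_eq_right hupd]
          · simp [PySem.List.enumerate, pvStep, hupd]
          · rw [pvSubFunc_concat]
            simp
        · -- x is strictly worse: state and extremal value unchanged, x ≠ m
          have hne' : ¬ (x == m) := by
            cases hb <;> simp_all <;> omega
          refine ⟨m, i, ?_, ?_, ?_⟩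
          · cases hb with
            | true =>
                simp only [if_true] at hext hupd ⊢
                rw [max?_id_concat xs x m hext, max_eq_left (le_of_lt (by omega))]
            | false =>
                simp only [Bool.false_eq_true, if_false] at hext hupd ⊢
                rw [min?_id_concat xs x m hext, min_eq_left (le_of_lt (by omega))]
          · simp [PySem.List.enumerate, pvStep, hupd]
          · rw [pvSubFunc_concat, if_neg hne']
            exact hlast

-- ===== VERDICT (by name: the statement is the Claim_ definition above) =====
theorem find_best_value_index_spec : Claim_equal_find_best_value_index := by
  intro l hb _ hne
  obtain ⟨m, i, hext, hfold, hlast⟩ := pv_key hb l hne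
  unfold Spec_find_best_value_index find_best_value_index find_best_value_index_alt
  rw [hfold]
  cases hb with
  | true =>
      simp only [if_true] at hext ⊢
      rw [hext]
      simp [PySem.List.pyGet?_neg_one, hlast]
  | false =>
      simp only [Bool.false_eq_true, if_false] at hext ⊢
      rw [hext]
      simp [PySem.List.pyGet?_neg_one, hlast]
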